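-- pv_equiv track=rewrite | github.com/marcelcaraciolo/recsys-mapreduce-mrjob | moviesSimilarities.py | count_ratings_users_freq
-- ===== SOURCE A (Python) =====
-- def count_ratings_users_freq(user_id, values):
--     """
--     For each user, emit a row containing their "postings"
--     (item,rating pairs)
--     Also emit user rating sum and count for use later steps.
--
--     17    1,3,(70,3)
--     35    1,1,(21,1)
--     49    3,7,(19,2 21,1 70,4)
--     87    2,3,(19,1 21,2)
--     98    1,2,(19,2)
--     """
--     item_count = 0
--     item_sum = 0
--     final = []
--     for item_id, rating in values:
--         item_count += 1
--         item_sum += rating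
--         final.append((item_id, rating))
--
--     yield user_id, (item_count, item_sum, final)
-- ===== SOURCE B (Python) =====
-- def count_ratings_users_freq(user_id, values):
--     """Divide-and-conquer: split the postings in half, aggregate each half
--     recursively, and merge the (count, sum, list) triples."""
--     def agg(vals):
--         if not vals:
--             return 0, 0, []
--         if len(vals) == 1:
--             item_id, rating = vals[0]
--             return 1, rating, [(item_id, rating)]
--         mid = len(vals) // 2
--         n1, s1, l1 = agg(vals[:mid])
--         n2, s2, l2 = agg(vals[mid:])
--         return n1 + n2, s1 + s2, l1 + l2
--
--     item_count, item_sum, final = agg(list(values))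
--     yield user_id, (item_count, item_sum, final)
-- ===== Notes on version B (the rewrite author's own statement) =====
-- stated objective: alternative
-- what changed: Replaces A's single fused left-to-right accumulation loop with a divide-and-conquer recursion: the postings list is split in half, each half is aggregated recursively, and the (count, sum, list) triples are merged by addition and concatenation.
import Mathlib
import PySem

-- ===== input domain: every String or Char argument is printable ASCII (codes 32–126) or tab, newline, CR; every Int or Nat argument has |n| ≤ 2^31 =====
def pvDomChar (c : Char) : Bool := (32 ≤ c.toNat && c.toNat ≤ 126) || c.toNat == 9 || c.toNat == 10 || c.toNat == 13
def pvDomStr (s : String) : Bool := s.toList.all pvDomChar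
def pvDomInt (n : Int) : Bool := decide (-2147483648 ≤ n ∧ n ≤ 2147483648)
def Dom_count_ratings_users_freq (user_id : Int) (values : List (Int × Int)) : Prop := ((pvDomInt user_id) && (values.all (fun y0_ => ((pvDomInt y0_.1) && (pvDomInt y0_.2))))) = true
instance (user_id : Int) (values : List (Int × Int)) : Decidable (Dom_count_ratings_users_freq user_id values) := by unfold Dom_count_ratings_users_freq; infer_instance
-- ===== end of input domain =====

-- B replaces A's fused accumulation loop with a divide-and-conquer aggregation (alternative; same result).

-- ===== PORT A =====
-- A: one loop updating (item_count, item_sum, final) together, then yield one row.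
def count_ratings_users_freq (user_id : Int) (values : List (Int × Int)) : List (Int × (Int × Int × (List (Int × Int)))) :=
  let st := values.foldl
    (fun (st : Int × Int × List (Int × Int)) v =>
      (st.1 + 1, st.2.1 + v.2, st.2.2 ++ [(v.1, v.2)]))
    (0, 0, [])
  [(user_id, (st.1, st.2.1, st.2.2))]

-- ===== PORT B =====
-- B's helper agg: split in half, recurse, merge triples by + and ++.
-- vals[:mid] / vals[mid:] are ported as take/drop, and len(vals)//2 as Nat division:
-- both exact here since lengths are nonnegative and 0 ≤ mid ≤ len(vals).
def pvAgg : List (Int × Int) → Int × Int × List (Int × Int)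
  | [] => (0, 0, [])
  | [v] => (1, v.2, [(v.1, v.2)])
  | x :: y :: t =>
      let r1 := pvAgg ((x :: y :: t).take ((x :: y :: t).length / 2))
      let r2 := pvAgg ((x :: y :: t).drop ((x :: y :: t).length / 2))
      (r1.1 + r2.1, r1.2.1 + r2.2.1, r1.2.2 ++ r2.2.2)
termination_by vals => vals.length
decreasing_by
  · simp [List.length_take]; omega
  · simp; omega

def count_ratings_users_freq_alt (user_id : Int) (values : List (Int × Int)) : List (Int × (Int × Int × (List (Int × Int)))) :=
  let r := pvAgg values
  [(user_id, (r.1, r.2.1, r.2.2))]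

-- ===== PRECONDITION & SPEC =====
def Spec_count_ratings_users_freq (user_id : Int) (values : List (Int × Int)) (out : List (Int × (Int × Int × (List (Int × Int))))) : Prop := out = count_ratings_users_freq_alt user_id values
instance (user_id : Int) (values : List (Int × Int)) (out : List (Int × (Int × Int × (List (Int × Int))))) : Decidable (Spec_count_ratings_users_freq user_id values out) := by unfold Spec_count_ratings_users_freq; infer_instance

-- ===== CLAIM (what is proved, stated in full; the proofs are below) =====
def Claim_equal_count_ratings_users_freq : Prop := ∀ (user_id : Int) (values : List (Int × Int)), Dom_count_ratings_users_freq user_id values → Spec_count_ratings_users_freq user_id values (count_ratings_users_freq user_id values)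

-- ===== LEMMAS AND PROOFS =====
-- A's fold from any starting state (c, s, acc) ends at (c + n, s + Σ ratings, acc ++ postings).
theorem pv_foldA_char (values : List (Int × Int)) (c s : Int) (acc : List (Int × Int)) :
    values.foldl
      (fun (st : Int × Int × List (Int × Int)) v =>
        (st.1 + 1, st.2.1 + v.2, st.2.2 ++ [(v.1, v.2)]))
      (c, s, acc)
    = (c + values.length, s + (values.map (fun v => v.2)).sum,
       acc ++ values.map (fun v => (v.1, v.2))) := by
  induction values generalizing c s acc with
  | nil => simp
  | cons h t ih =>
    simp [List.foldl, ih, List.sum_cons]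
    constructor
    · ring
    · ring

-- B's divide-and-conquer returns the same triple: length, sum of ratings, the retupled list.
theorem pvAgg_char (vals : List (Int × Int)) :
    pvAgg vals = ((vals.length : Int), (vals.map (fun v => v.2)).sum,
                  vals.map (fun v => (v.1, v.2))) := by
  induction vals using pvAgg.induct with
  | case1 => simp [pvAgg]
  | case2 v => simp [pvAgg]
  | case3 x y t ih1 ih2 =>
    rw [pvAgg]
    simp only [ih1, ih2]
    conv_rhs => rw [← List.take_append_drop ((x :: y :: t).length / 2) (x :: y :: t)]
    simp [Prod.ext_iff]
    omega

-- ===== VERDICT (by name: the statement is the Claim_ definition above) =====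
theorem count_ratings_users_freq_spec : Claim_equal_count_ratings_users_freq := by
  intro user_id values _
  unfold Spec_count_ratings_users_freq count_ratings_users_freq count_ratings_users_freq_alt
  simp [pv_foldA_char, pvAgg_char]
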